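-- pv_equiv track=rewrite | github.com/yfyourfriend/CAY-algorithm | BinaryMatrix_to_JPEG.py | big_M
-- ===== SOURCE A (Python) =====
-- def big_M(input_mat):
--     """
--     Assume 3 alphabets; -1,0,1 as input from a list of list matrix
--     Each alphabet is defined to have a k x k shape, where k=5 in this case
--     Returns 5 times bigger matrix.
--     """
--     lenmat = len(input_mat)
--     # define 5 times bigger matrix
--     output_mat = [[0 for i in range(5*lenmat)] for j in range(5*lenmat)]
--     # define shape for 0
--     shape_zero = [[0 for i in range(5)] for j in range(5)]
--     # define shape for 1
--     shape_one = [[1 for i in range(5)] for j in range(5)]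
--     # define shape for -1
--     shape_min = [[0 for i in range(5)] for j in range(5)]
--     shape_min[3][3] = 1
--     shape_min[2][2] = 1
--     shape_min[4][4] = 1
--     shape_min[2][4] = 1
--
--     for i in range(lenmat):
--         for j in range(lenmat):
--             # where i,j correspond to row, col of mat
--             # Produce 5 x 5 for each entry
--
--             # Case 1 : entry is 0
--             if input_mat[i][j] == 0:
--                 for k in range(5):
--                     for l in range(5):
--                         output_mat[5*i+k][5*j+l] = shape_zero[k][l]
--             # Case 2 : entry is 1
--             if input_mat[i][j] == 1:
--                 for k in range(5):
--                     for l in range(5):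
--                         output_mat[5*i+k][5*j+l] = shape_one[k][l]
--             # Case 3 : entry is -1
--             if input_mat[i][j] == -1:
--                 for k in range(5):
--                     for l in range(5):
--                         output_mat[5*i+k][5*j+l] = shape_min[k][l]
--     return output_mat
-- ===== SOURCE B (Python) =====
-- def big_M(input_mat):
--     """Output-coordinate driven: compute each cell of the 5n x 5n result directly
--     from its own indices (r, c) by a closed-form rule, instead of expanding input
--     entries into glyph blocks."""
--     n = len(input_mat)
--     minus_dots = {(3, 3), (2, 2), (4, 4), (2, 4)}
--     return [[1 if input_mat[r // 5][c // 5] == 1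
--              or (input_mat[r // 5][c // 5] == -1 and (r % 5, c % 5) in minus_dots)
--              else 0
--              for c in range(5 * n)]
--             for r in range(5 * n)]
-- ===== Notes on version B (the rewrite author's own statement) =====
-- stated objective: alternative
-- what changed: B is output-coordinate driven: it iterates over the 5n x 5n output indices and computes each cell directly from (r,c) via floor-division/mod index arithmetic and one closed-form rule, with no glyph tables and no per-entry block expansion, whereas A iterates over input entries and scatters prebuilt 5x5 shape matrices into a preallocated zero grid.
import Mathlib
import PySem

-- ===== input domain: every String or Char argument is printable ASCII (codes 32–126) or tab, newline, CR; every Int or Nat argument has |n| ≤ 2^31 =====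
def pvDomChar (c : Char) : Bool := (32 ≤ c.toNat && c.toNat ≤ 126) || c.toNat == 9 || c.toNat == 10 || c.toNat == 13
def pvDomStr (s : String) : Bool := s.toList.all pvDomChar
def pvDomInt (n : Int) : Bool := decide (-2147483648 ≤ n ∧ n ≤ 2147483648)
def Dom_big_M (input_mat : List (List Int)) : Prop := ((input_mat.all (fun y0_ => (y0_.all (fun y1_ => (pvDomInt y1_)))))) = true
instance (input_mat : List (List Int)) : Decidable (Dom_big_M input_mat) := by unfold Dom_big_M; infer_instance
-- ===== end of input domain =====

-- B is output-coordinate driven: each cell of the 5n×5n result is computed directly from its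
-- own indices (r,c) by a closed-form rule (no glyph tables, no block scatter); objective: alternative, same cost.

-- ===== PORT A =====
-- `m[r][c] = v` on a 2D list, nonnegative indices (in range wherever A executes it; A does this to build shape_min)
def set2 (m : List (List Int)) (r c : Nat) (v : Int) : List (List Int) :=
  m.set r ((m.getD r []).set c v)

-- the repeated `for k in range(5): for l in range(5): output_mat[5*i+k][5*j+l] = shape[k][l]` loop text of A
def writeBlock (om : List (List Int)) (i j : Nat) (shape : List (List Int)) : List (List Int) :=
  (List.range 5).foldl (fun om k =>
    (List.range 5).foldl (fun om l =>
      set2 om (5*i+k) (5*j+l) ((shape.getD k []).getD l 0)) om) om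

def big_M (input_mat : List (List Int)) : List (List Int) :=
  let lenmat := input_mat.length
  let output_mat := (List.range (5*lenmat)).map (fun _ => (List.range (5*lenmat)).map (fun _ => (0:Int)))
  let shape_zero := (List.range 5).map (fun _ => (List.range 5).map (fun _ => (0:Int)))
  let shape_one := (List.range 5).map (fun _ => (List.range 5).map (fun _ => (1:Int)))
  let shape_min := set2 (set2 (set2 (set2 ((List.range 5).map (fun _ => (List.range 5).map (fun _ => (0:Int)))) 3 3 1) 2 2 1) 4 4 1) 2 4 1
  (List.range lenmat).foldl (fun om i =>
    (List.range lenmat).foldl (fun om j =>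
      -- input_mat[i][j]: nonnegative indices, in range under Pre_big_M
      let v := (input_mat.getD i []).getD j 0
      let om := if v = 0 then writeBlock om i j shape_zero else om
      let om := if v = 1 then writeBlock om i j shape_one else om
      if v = -1 then writeBlock om i j shape_min else om) om) output_mat

-- ===== PORT B =====
def big_M_alt (input_mat : List (List Int)) : List (List Int) :=
  let n := input_mat.length
  let minus_dots : PySem.Set (Nat × Nat) := PySem.Set.ofList [(3,3),(2,2),(4,4),(2,4)]
  (List.range (5*n)).map (fun r =>
    (List.range (5*n)).map (fun c =>
      -- input_mat[r//5][c//5]: nonnegative indices, in range under Pre_big_M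
      if (input_mat.getD (r/5) []).getD (c/5) 0 = 1 ∨
         ((input_mat.getD (r/5) []).getD (c/5) 0 = -1 ∧ (r % 5, c % 5) ∈ minus_dots)
      then (1:Int) else 0))

-- ===== PRECONDITION & SPEC =====
-- Pre_ excludes exactly the inputs where Python A raises IndexError: some row shorter than the number of rows.
def Pre_big_M (input_mat : List (List Int)) : Prop :=
  ∀ row ∈ input_mat, input_mat.length ≤ row.length
instance (input_mat : List (List Int)) : Decidable (Pre_big_M input_mat) := by unfold Pre_big_M; infer_instance

def pvWitness_big_M : List (List Int) := [[1, -1], [0, 2]]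

def Spec_big_M (input_mat : List (List Int)) (out : List (List Int)) : Prop := out = big_M_alt input_mat
instance (input_mat : List (List Int)) (out : List (List Int)) : Decidable (Spec_big_M input_mat out) := by unfold Spec_big_M; infer_instance

-- ===== CLAIM (what is proved, stated in full; the proofs are below) =====
def Claim_equal_big_M : Prop := ∀ (input_mat : List (List Int)), Dom_big_M input_mat → Pre_big_M input_mat → Spec_big_M input_mat (big_M input_mat)

-- ===== LEMMAS AND PROOFS =====

-- the value every cell (k,l) of the 5x5 block of v carries
def gfun (v : Int) (k l : Nat) : Int :=
  if v = 1 then 1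
  else if v = -1 then
    (if (k = 3 ∧ l = 3) ∨ (k = 2 ∧ l = 2) ∨ (k = 4 ∧ l = 4) ∨ (k = 2 ∧ l = 4) then 1 else 0)
  else 0

-- the common value of both programs, as a closed map over ranges
def specMat (m : List (List Int)) : List (List Int) :=
  (List.range (5*m.length)).map (fun r =>
    (List.range (5*m.length)).map (fun c =>
      gfun ((m.getD (r/5) []).getD (c/5) 0) (r % 5) (c % 5)))

theorem alt_eq_spec (m : List (List Int)) : big_M_alt m = specMat m := by
  simp only [big_M_alt, specMat]
  apply List.map_congr_left
  intro r _
  apply List.map_congr_left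
  intro c _
  set v := (m.getD (r/5) []).getD (c/5) 0 with hv
  have hmem : ((r % 5, c % 5) ∈ PySem.Set.ofList [(3,3),(2,2),(4,4),(2,4)] : Prop) ↔
      ((r%5 = 3 ∧ c%5 = 3) ∨ (r%5 = 2 ∧ c%5 = 2) ∨ (r%5 = 4 ∧ c%5 = 4) ∨ (r%5 = 2 ∧ c%5 = 4)) := by
    rw [PySem.Set.mem_ofList]
    simp [Prod.ext_iff]
  rw [gfun]
  by_cases h1 : v = 1
  · rw [if_pos h1, if_pos (Or.inl h1)]
  · rw [if_neg h1]
    by_cases hm : v = -1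
    · rw [if_pos hm]
      by_cases hd : (r%5 = 3 ∧ c%5 = 3) ∨ (r%5 = 2 ∧ c%5 = 2) ∨ (r%5 = 4 ∧ c%5 = 4) ∨ (r%5 = 2 ∧ c%5 = 4)
      · rw [if_pos hd, if_pos (Or.inr ⟨hm, hmem.mpr hd⟩)]
      · rw [if_neg hd, if_neg (by rintro (h | ⟨_, h⟩); exact h1 h; exact hd (hmem.mp h))]
    · rw [if_neg hm, if_neg (by rintro (h | ⟨h, _⟩); exact h1 h; exact hm h)]

def E (m : List (List Int)) (r c : Nat) : Int := (m.getD r []).getD c 0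
def Good (n : Nat) (m : List (List Int)) : Prop :=
  m.length = 5*n ∧ ∀ r, r < 5*n → (m.getD r []).length = 5*n
def shapeZeroG : List (List Int) := (List.range 5).map (fun _ => (List.range 5).map (fun _ => (0:Int)))
def shapeOneG : List (List Int) := (List.range 5).map (fun _ => (List.range 5).map (fun _ => (1:Int)))
def shapeMinG : List (List Int) := set2 (set2 (set2 (set2 ((List.range 5).map (fun _ => (List.range 5).map (fun _ => (0:Int)))) 3 3 1) 2 2 1) 4 4 1) 2 4 1
def bodyF (input : List (List Int)) (i : Nat) (om : List (List Int)) (j : Nat) : List (List Int) :=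
  let v := (input.getD i []).getD j 0
  let om1 := if v = 0 then writeBlock om i j shapeZeroG else om
  let om2 := if v = 1 then writeBlock om1 i j shapeOneG else om1
  if v = -1 then writeBlock om2 i j shapeMinG else om2
def grid0 (n : Nat) : List (List Int) :=
  (List.range (5*n)).map (fun _ => (List.range (5*n)).map (fun _ => (0:Int)))

theorem big_M_eq_fold (m : List (List Int)) :
    big_M m = (List.range m.length).foldl (fun om i => (List.range m.length).foldl (bodyF m i) om) (grid0 m.length) := rfl

theorem getD_set (xs : List Int) (i j : Nat) (v d : Int) :
    (xs.set i v).getD j d = if j = i ∧ i < xs.length then v else xs.getD j d := by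
  simp only [List.getD_eq_getElem?_getD, List.getElem?_set]
  split_ifs with h1 h2 h3 h4 <;> simp_all

theorem rowGetD_set (m : List (List Int)) (i j : Nat) (x : List Int) :
    (m.set i x).getD j [] = if j = i ∧ i < m.length then x else m.getD j [] := by
  simp only [List.getD_eq_getElem?_getD, List.getElem?_set]
  split_ifs with h1 h2 h3 h4 <;> simp_all

theorem set2_good {n : Nat} {m : List (List Int)} (good : Good n m) (r c : Nat) (v : Int) :
    Good n (set2 m r c v) := by
  obtain ⟨h1, h2⟩ := good
  refine ⟨by simp [set2, h1], ?_⟩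
  intro r' hr'
  rw [set2, rowGetD_set]
  split_ifs with h
  · rw [List.length_set]; exact h2 r (h1 ▸ h.2)
  · exact h2 r' hr'

theorem E_set2 {n : Nat} {m : List (List Int)} (good : Good n m) {r c : Nat}
    (hr : r < 5*n) (hc : c < 5*n) (v : Int) (r' c' : Nat) :
    E (set2 m r c v) r' c' = if r' = r ∧ c' = c then v else E m r' c' := by
  obtain ⟨h1, h2⟩ := good
  rw [E, set2, rowGetD_set]
  by_cases hrr : r' = r
  · rw [if_pos ⟨hrr, by omega⟩, getD_set]
    subst hrr
    rw [h2 r' hr]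
    split_ifs with h h' <;> simp_all [E]
  · rw [if_neg (by tauto), if_neg (by tauto)]; rfl

theorem inner_fold {n j : Nat} (hj : j < n) {R : Nat} (hR : R < 5*n) (f : Nat → Int) :
    ∀ (L : List Nat), (∀ l ∈ L, l < 5) → ∀ m, Good n m →
      Good n (L.foldl (fun om l => set2 om R (5*j+l) (f l)) m) ∧
      ∀ r c, E (L.foldl (fun om l => set2 om R (5*j+l) (f l)) m) r c =
        if r = R ∧ 5*j ≤ c ∧ c - 5*j ∈ L then f (c - 5*j) else E m r c := by
  intro L
  induction L with
  | nil =>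
    intro _ m good
    exact ⟨good, by intro r c; simp⟩
  | cons l L ih =>
    intro hL m good
    have hlt : 5*j+l < 5*n := by have := hL l (List.mem_cons_self); omega
    obtain ⟨good', hE'⟩ := ih (fun x hx => hL x (List.mem_cons_of_mem _ hx))
      (set2 m R (5*j+l) (f l)) (set2_good good _ _ _)
    refine ⟨good', ?_⟩
    intro r c
    rw [List.foldl_cons, hE' r c, E_set2 good hR hlt]
    by_cases h1 : r = R ∧ 5*j ≤ c ∧ c - 5*j ∈ L
    · rw [if_pos h1, if_pos ⟨h1.1, h1.2.1, List.mem_cons_of_mem _ h1.2.2⟩]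
    · rw [if_neg h1]
      by_cases h2 : r = R ∧ c = 5*j + l
      · have hcl : c - 5*j = l := by omega
        rw [if_pos h2, if_pos ⟨h2.1, by omega, by rw [hcl]; exact List.mem_cons_self⟩, hcl]
      · rw [if_neg h2, if_neg ?_]
        rintro ⟨ha, hb, hm⟩
        rcases List.mem_cons.mp hm with h | h
        · exact h2 ⟨ha, by omega⟩
        · exact h1 ⟨ha, hb, h⟩

theorem block_fold {n i j : Nat} (hi : i < n) (hj : j < n) (g : Nat → Nat → Int) :
    ∀ (K : List Nat), (∀ k ∈ K, k < 5) → ∀ m, Good n m →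
      Good n (K.foldl (fun om k => (List.range 5).foldl (fun om l => set2 om (5*i+k) (5*j+l) (g k l)) om) m) ∧
      ∀ r c, E (K.foldl (fun om k => (List.range 5).foldl (fun om l => set2 om (5*i+k) (5*j+l) (g k l)) om) m) r c =
        if 5*i ≤ r ∧ r - 5*i ∈ K ∧ 5*j ≤ c ∧ c < 5*j+5 then g (r - 5*i) (c - 5*j) else E m r c := by
  intro K
  induction K with
  | nil =>
    intro _ m good
    exact ⟨good, by intro r c; simp⟩
  | cons k K ih =>
    intro hK m good
    have hk5 : k < 5 := hK k List.mem_cons_self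
    have hR : 5*i+k < 5*n := by omega
    obtain ⟨good1, hE1⟩ := inner_fold hj hR (g k) (List.range 5) (fun l hl => List.mem_range.mp hl) m good
    obtain ⟨good', hE'⟩ := ih (fun x hx => hK x (List.mem_cons_of_mem _ hx)) _ good1
    refine ⟨good', ?_⟩
    intro r c
    rw [List.foldl_cons, hE' r c, hE1 r c]
    by_cases h1 : 5*i ≤ r ∧ r - 5*i ∈ K ∧ 5*j ≤ c ∧ c < 5*j+5
    · rw [if_pos h1, if_pos ⟨h1.1, List.mem_cons_of_mem _ h1.2.1, h1.2.2⟩]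
    · rw [if_neg h1]
      by_cases h2 : r = 5*i+k ∧ 5*j ≤ c ∧ c - 5*j ∈ List.range 5
      · have hc5 : c - 5*j < 5 := List.mem_range.mp h2.2.2
        rw [if_pos h2, if_pos ⟨by omega, by rw [show r - 5*i = k by omega]; exact List.mem_cons_self, by omega, by omega⟩,
          show r - 5*i = k by omega]
      · rw [if_neg h2, if_neg ?_]
        rintro ⟨ha, hb, hc, hd⟩
        rcases List.mem_cons.mp hb with h | h
        · exact h2 ⟨by omega, by omega, List.mem_range.mpr (by omega)⟩
        · exact h1 ⟨ha, h, hc, hd⟩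

theorem writeBlock_E {n i j : Nat} (hi : i < n) (hj : j < n) (shape : List (List Int))
    {m : List (List Int)} (good : Good n m) :
    Good n (writeBlock m i j shape) ∧
    ∀ r c, E (writeBlock m i j shape) r c =
      if 5*i ≤ r ∧ r < 5*i+5 ∧ 5*j ≤ c ∧ c < 5*j+5
      then (shape.getD (r-5*i) []).getD (c-5*j) 0 else E m r c := by
  obtain ⟨good', hE⟩ := block_fold hi hj (fun k l => (shape.getD k []).getD l 0)
    (List.range 5) (fun k hk => List.mem_range.mp hk) m good
  refine ⟨good', ?_⟩
  intro r c
  rw [writeBlock, hE r c]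
  by_cases h : 5*i ≤ r ∧ r - 5*i ∈ List.range 5 ∧ 5*j ≤ c ∧ c < 5*j+5
  · have := List.mem_range.mp h.2.1
    rw [if_pos h, if_pos ⟨h.1, by omega, h.2.2⟩]
  · rw [if_neg h, if_neg ?_]
    rintro ⟨ha, hb, hc, hd⟩
    exact h ⟨ha, List.mem_range.mpr (by omega), hc, hd⟩

theorem shapeZero_E (k l : Nat) (hk : k < 5) (hl : l < 5) :
    ((shapeZeroG.getD k []).getD l 0) = gfun 0 k l := by
  interval_cases k <;> interval_cases l <;> rfl
theorem shapeOne_E (k l : Nat) (hk : k < 5) (hl : l < 5) :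
    ((shapeOneG.getD k []).getD l 0) = gfun 1 k l := by
  interval_cases k <;> interval_cases l <;> rfl
theorem shapeMin_E (k l : Nat) (hk : k < 5) (hl : l < 5) :
    ((shapeMinG.getD k []).getD l 0) = gfun (-1) k l := by
  interval_cases k <;> interval_cases l <;> rfl

theorem body_E {n i j : Nat} (hi : i < n) (hj : j < n) (input : List (List Int))
    {m : List (List Int)} (good : Good n m) :
    Good n (bodyF input i m j) ∧
    ∀ r c, E (bodyF input i m j) r c =
      let v := (input.getD i []).getD j 0
      if 5*i ≤ r ∧ r < 5*i+5 ∧ 5*j ≤ c ∧ c < 5*j+5 ∧ (v = 0 ∨ v = 1 ∨ v = -1)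
      then gfun v (r-5*i) (c-5*j) else E m r c := by
  simp only [bodyF]
  set v := (input.getD i []).getD j 0 with hv
  by_cases h0 : v = 0
  · rw [if_pos h0, if_neg (by omega), if_neg (by omega)]
    obtain ⟨good', hE⟩ := writeBlock_E hi hj shapeZeroG good
    refine ⟨good', ?_⟩
    intro r c
    rw [hE r c]
    simp only [h0]
    by_cases h : 5*i ≤ r ∧ r < 5*i+5 ∧ 5*j ≤ c ∧ c < 5*j+5
    · rw [if_pos h, if_pos (by tauto), shapeZero_E _ _ (by omega) (by omega)]
    · rw [if_neg h, if_neg (by tauto)]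
  by_cases h1 : v = 1
  · rw [if_neg h0, if_pos h1, if_neg (by omega)]
    obtain ⟨good', hE⟩ := writeBlock_E hi hj shapeOneG good
    refine ⟨good', ?_⟩
    intro r c
    rw [hE r c]
    simp only [h1]
    by_cases h : 5*i ≤ r ∧ r < 5*i+5 ∧ 5*j ≤ c ∧ c < 5*j+5
    · rw [if_pos h, if_pos (by tauto), shapeOne_E _ _ (by omega) (by omega)]
    · rw [if_neg h, if_neg (by tauto)]
  by_cases hm1 : v = -1
  · rw [if_neg h0, if_neg h1, if_pos hm1]
    obtain ⟨good', hE⟩ := writeBlock_E hi hj shapeMinG good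
    refine ⟨good', ?_⟩
    intro r c
    rw [hE r c]
    simp only [hm1]
    by_cases h : 5*i ≤ r ∧ r < 5*i+5 ∧ 5*j ≤ c ∧ c < 5*j+5
    · rw [if_pos h, if_pos (by tauto), shapeMin_E _ _ (by omega) (by omega)]
    · rw [if_neg h, if_neg (by tauto)]
  · rw [if_neg h0, if_neg h1, if_neg hm1]
    refine ⟨good, ?_⟩
    intro r c
    rw [if_neg (by tauto)]

theorem j_fold {n i : Nat} (hi : i < n) (input : List (List Int)) :
    ∀ (J : List Nat), (∀ j ∈ J, j < n) → J.Nodup → ∀ m, Good n m →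
      (∀ r c, 5*i ≤ r → r < 5*i+5 → ∀ j ∈ J, 5*j ≤ c → c < 5*j+5 → E m r c = 0) →
      Good n (J.foldl (bodyF input i) m) ∧
      ∀ r c, E (J.foldl (bodyF input i) m) r c =
        if 5*i ≤ r ∧ r < 5*i+5 ∧ c < 5*n ∧ c/5 ∈ J
        then gfun ((input.getD i []).getD (c/5) 0) (r%5) (c%5) else E m r c := by
  intro J
  induction J with
  | nil =>
    intro _ _ m good _
    exact ⟨good, by intro r c; simp⟩
  | cons j J ih =>
    intro hJ nd m good hz
    have hjn : j < n := hJ j List.mem_cons_self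
    obtain ⟨good1, hE1⟩ := body_E hi hjn input good
    have hz1 : ∀ r c, 5*i ≤ r → r < 5*i+5 → ∀ j' ∈ J, 5*j' ≤ c → c < 5*j'+5 →
        E (bodyF input i m j) r c = 0 := by
      intro r c h1 h2 j' hj' h3 h4
      have hne : j' ≠ j := fun h => (List.nodup_cons.mp nd).1 (h ▸ hj')
      rw [hE1 r c]
      simp only
      rw [if_neg (by rintro ⟨_, _, h5, h6, _⟩; omega)]
      exact hz r c h1 h2 j' (List.mem_cons_of_mem _ hj') h3 h4
    obtain ⟨good', hE'⟩ := ih (fun x hx => hJ x (List.mem_cons_of_mem _ hx))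
      (List.nodup_cons.mp nd).2 (bodyF input i m j) good1 hz1
    refine ⟨good', ?_⟩
    intro r c
    rw [List.foldl_cons, hE' r c]
    by_cases hband : 5*i ≤ r ∧ r < 5*i+5
    · by_cases hcJ : c < 5*n ∧ c/5 ∈ J
      · rw [if_pos ⟨hband.1, hband.2, hcJ.1, hcJ.2⟩,
            if_pos ⟨hband.1, hband.2, hcJ.1, List.mem_cons_of_mem _ hcJ.2⟩]
      · rw [if_neg (by tauto), hE1 r c]
        simp only
        by_cases hcj : 5*j ≤ c ∧ c < 5*j+5
        · have hc5 : c/5 = j := by omega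
          have hcn : c < 5*n := by omega
          by_cases hvv : (input.getD i []).getD j 0 = 0 ∨ (input.getD i []).getD j 0 = 1 ∨
              (input.getD i []).getD j 0 = -1
          · rw [if_pos ⟨hband.1, hband.2, hcj.1, hcj.2, hvv⟩,
                if_pos ⟨hband.1, hband.2, hcn, by rw [hc5]; exact List.mem_cons_self⟩, hc5,
                show r - 5*i = r%5 by omega, show c - 5*j = c%5 by omega]
          · rw [if_neg (by tauto),
                if_pos ⟨hband.1, hband.2, hcn, by rw [hc5]; exact List.mem_cons_self⟩, hc5,
                hz r c hband.1 hband.2 j List.mem_cons_self hcj.1 hcj.2]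
            have hn1 : (input.getD i []).getD j 0 ≠ 1 := fun h => hvv (Or.inr (Or.inl h))
            have hn2 : (input.getD i []).getD j 0 ≠ -1 := fun h => hvv (Or.inr (Or.inr h))
            rw [gfun, if_neg hn1, if_neg hn2]
        · rw [if_neg (by tauto), if_neg ?_]
          rintro ⟨h1, h2, h3, h4⟩
          rcases List.mem_cons.mp h4 with h | h
          · exact hcj ⟨by omega, by omega⟩
          · exact hcJ ⟨h3, h⟩
    · rw [if_neg (by tauto), hE1 r c]
      simp only
      rw [if_neg (by tauto), if_neg (by tauto)]

theorem i_fold {n : Nat} (input : List (List Int)) :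
    ∀ (I : List Nat), (∀ i ∈ I, i < n) → I.Nodup → ∀ m, Good n m →
      (∀ r c, r/5 ∈ I → c < 5*n → E m r c = 0) →
      Good n (I.foldl (fun om i => (List.range n).foldl (bodyF input i) om) m) ∧
      ∀ r c, E (I.foldl (fun om i => (List.range n).foldl (bodyF input i) om) m) r c =
        if r < 5*n ∧ c < 5*n ∧ r/5 ∈ I
        then gfun ((input.getD (r/5) []).getD (c/5) 0) (r%5) (c%5) else E m r c := by
  intro I
  induction I with
  | nil =>
    intro _ _ m good _
    exact ⟨good, by intro r c; simp⟩
  | cons i I ih =>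
    intro hI nd m good hz
    have hin : i < n := hI i List.mem_cons_self
    obtain ⟨good1, hE1⟩ := j_fold hin input (List.range n)
      (fun j hj => List.mem_range.mp hj) (List.nodup_range) m good
      (by
        intro r c h1 h2 j hj h3 h4
        exact hz r c (by rw [show r/5 = i by omega]; exact List.mem_cons_self)
          (by have := List.mem_range.mp hj; omega))
    have hz1 : ∀ r c, r/5 ∈ I → c < 5*n →
        E ((List.range n).foldl (bodyF input i) m) r c = 0 := by
      intro r c hr hc
      have hne : r/5 ≠ i := fun h => (List.nodup_cons.mp nd).1 (h ▸ hr)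
      rw [hE1 r c, if_neg (by rintro ⟨h1, h2, _, _⟩; omega)]
      exact hz r c (List.mem_cons_of_mem _ hr) hc
    obtain ⟨good', hE'⟩ := ih (fun x hx => hI x (List.mem_cons_of_mem _ hx))
      (List.nodup_cons.mp nd).2 _ good1 hz1
    refine ⟨good', ?_⟩
    intro r c
    rw [List.foldl_cons, hE' r c]
    by_cases h1 : r < 5*n ∧ c < 5*n ∧ r/5 ∈ I
    · rw [if_pos h1, if_pos ⟨h1.1, h1.2.1, List.mem_cons_of_mem _ h1.2.2⟩]
    · rw [if_neg h1, hE1 r c]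
      by_cases h2 : 5*i ≤ r ∧ r < 5*i+5 ∧ c < 5*n ∧ c/5 ∈ List.range n
      · have hr5 : r/5 = i := by omega
        rw [if_pos h2, if_pos ⟨by omega, h2.2.2.1, by rw [hr5]; exact List.mem_cons_self⟩, hr5]
      · rw [if_neg h2, if_neg ?_]
        rintro ⟨ha, hb, hc⟩
        rcases List.mem_cons.mp hc with h | h
        · exact h2 ⟨by omega, by omega, hb, List.mem_range.mpr (by omega)⟩
        · exact h1 ⟨ha, hb, h⟩

theorem getD_eq_getElem' (l : List (List Int)) (r : Nat) (h : r < l.length) :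
    l.getD r [] = l[r] := by
  simp [List.getD_eq_getElem?_getD, List.getElem?_eq_getElem h]

theorem getD_eq_getElem'' (l : List Int) (c : Nat) (h : c < l.length) :
    l.getD c 0 = l[c] := by
  simp [List.getD_eq_getElem?_getD, List.getElem?_eq_getElem h]

theorem eq_of_Good_E {n : Nat} {m1 m2 : List (List Int)} (g1 : Good n m1) (g2 : Good n m2)
    (h : ∀ r c, r < 5*n → c < 5*n → E m1 r c = E m2 r c) : m1 = m2 := by
  apply List.ext_getElem (by rw [g1.1, g2.1])
  intro r h1 h2
  have hr : r < 5*n := g1.1 ▸ h1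
  have hl1 := g1.2 r hr
  have hl2 := g2.2 r hr
  rw [getD_eq_getElem' _ _ h1] at hl1
  rw [getD_eq_getElem' _ _ h2] at hl2
  apply List.ext_getElem (by rw [hl1, hl2])
  intro c hc1 hc2
  have hc : c < 5*n := hl1 ▸ hc1
  have := h r c hr hc
  rw [E, E, getD_eq_getElem' _ _ h1, getD_eq_getElem' _ _ h2,
    getD_eq_getElem'' _ _ hc1, getD_eq_getElem'' _ _ hc2] at this
  exact this

theorem grid0_eq (n : Nat) : grid0 n = List.replicate (5*n) (List.replicate (5*n) (0:Int)) := by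
  simp [grid0]

theorem grid0_good (n : Nat) : Good n (grid0 n) := by
  rw [grid0_eq]
  refine ⟨by simp, ?_⟩
  intro r hr
  rw [List.getD_eq_getElem?_getD, List.getElem?_replicate, if_pos hr]
  simp

theorem grid0_E (n : Nat) (r c : Nat) : E (grid0 n) r c = 0 := by
  simp only [E, grid0_eq, List.getD_eq_getElem?_getD, List.getElem?_replicate]
  split
  · simp only [Option.getD_some, List.getElem?_replicate]
    split <;> simp
  · simp

theorem spec_good (m : List (List Int)) : Good m.length (specMat m) := by
  refine ⟨by simp [specMat], ?_⟩
  intro r hr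
  simp only [specMat, List.getD_eq_getElem?_getD, List.getElem?_map, List.getElem?_range hr]
  simp

theorem E_spec (m : List (List Int)) (r c : Nat) (hr : r < 5*m.length) (hc : c < 5*m.length) :
    E (specMat m) r c = gfun ((m.getD (r/5) []).getD (c/5) 0) (r%5) (c%5) := by
  simp only [E, specMat, List.getD_eq_getElem?_getD, List.getElem?_map, List.getElem?_range hr]
  simp only [Option.map_some, Option.getD_some, List.getElem?_map, List.getElem?_range hc]

theorem a_eq_spec (m : List (List Int)) : big_M m = specMat m := by
  rw [big_M_eq_fold]
  obtain ⟨good, hE⟩ := i_fold (n := m.length) m (List.range m.length)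
    (fun i hi => List.mem_range.mp hi) List.nodup_range (grid0 m.length) (grid0_good m.length)
    (fun r c _ _ => grid0_E m.length r c)
  apply eq_of_Good_E good (spec_good m)
  intro r c hr hc
  rw [hE r c, if_pos ⟨hr, hc, List.mem_range.mpr (by omega)⟩, E_spec m r c hr hc]

-- ===== VERDICT (by name: the statement is the Claim_ definition above) =====
theorem big_M_spec : Claim_equal_big_M := by
  intro m _ _
  unfold Spec_big_M
  rw [a_eq_spec, alt_eq_spec]
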